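-- pv_equiv track=rewrite | github.com/biicode/common | edition/parsing/file_parser.py | find_directive_end
-- ===== SOURCE A (Python) =====
-- def find_directive_end(content, start):
--     while True:
--         fin = content.find('\n', start + 1)
--         if fin == -1 or fin == start:
--             return fin
--         aux = content[start:fin].rstrip()  # check for multiline breaks
--         if len(aux) == 0 or aux[-1] != '\\':
--             return fin
--         start = fin + 1
-- ===== SOURCE B (Python) =====
-- def find_directive_end(content, start):
--     # One left-to-right character scan tracking the last non-whitespace char of the
--     # current segment; no find/slice/rstrip passes. Intended for start >= 0.
--     seg = start
--     last = None
--     for j in range(start, len(content)):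
--         c = content[j]
--         if c == '\n' and j > seg:
--             if last != '\\':
--                 return j
--             seg = j + 1
--             last = None
--         elif not c.isspace():
--             last = c
--     return -1
-- ===== Notes on version B (the rewrite author's own statement) =====
-- stated objective: alternative
-- what changed: A repeatedly calls find, slices the segment and rstrips it each round; B makes one left-to-right character scan tracking the segment start and the last non-whitespace character seen, so the slice/rstrip passes disappear.
-- outside the precondition, e.g. on find_directive_end('a\\\nb\nc\n', -7): A returns 4, B returns -3
import Mathlib
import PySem

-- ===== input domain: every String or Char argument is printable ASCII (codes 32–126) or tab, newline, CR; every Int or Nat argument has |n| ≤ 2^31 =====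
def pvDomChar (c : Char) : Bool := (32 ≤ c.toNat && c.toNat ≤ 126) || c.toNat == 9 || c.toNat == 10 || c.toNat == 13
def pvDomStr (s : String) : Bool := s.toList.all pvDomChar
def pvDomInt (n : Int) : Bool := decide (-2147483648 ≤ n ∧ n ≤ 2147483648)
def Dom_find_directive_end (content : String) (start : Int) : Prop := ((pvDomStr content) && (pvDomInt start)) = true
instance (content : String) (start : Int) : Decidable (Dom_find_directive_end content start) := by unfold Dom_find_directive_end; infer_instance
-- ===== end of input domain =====

-- B replaces A's repeated find/slice/rstrip passes by a single left-to-right character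
-- scan that tracks the last non-whitespace character of the current segment (objective:
-- alternative single-pass formulation; not measured faster).

-- ===== PORT A =====
-- A's `while True` loop; fin strictly increases each round, so `content.length + 1`
-- rounds of fuel always suffice (the 0-fuel branch is unreachable).
def pvALoop (cs : List Char) (start : Int) : Nat → Int
  | 0 => -1
  | fuel + 1 =>
    let fin := PySem.Chars.findFrom cs ['\n'] (start + 1) none
    if fin = -1 ∨ fin = start then fin
    else
      let aux := PySem.Chars.rstrip (PySem.List.slice cs (some start) (some fin))
      if aux.length = 0 ∨ PySem.List.pyGet? aux (-1) ≠ some '\\' then fin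
      else pvALoop cs (fin + 1) fuel

def find_directive_end (content : String) (start : Int) : Int :=
  pvALoop content.toList start (content.toList.length + 1)

-- ===== PORT B =====
-- Source B's for-loop over j = start..len-1 with state (seg, last).
def pvBLoop (cs : List Char) (seg : Int) (last : Option Char) (j : Int) : Int :=
  if j < (cs.length : Int) then
    match PySem.List.pyGet? cs j with
    | none => -1  -- content[j] raises IndexError in Python (j < -len; outside Pre_)
    | some c =>
      if c = '\n' ∧ seg < j then
        if last ≠ some '\\' then j
        else pvBLoop cs (j + 1) none (j + 1)
      else if ¬ PySem.Chars.isspace c then pvBLoop cs seg (some c) (j + 1)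
      else pvBLoop cs seg last (j + 1)
  else -1
termination_by ((cs.length : Int) - j).toNat
decreasing_by all_goals omega

def find_directive_end_alt (content : String) (start : Int) : Int :=
  pvBLoop content.toList start none start

-- ===== PRECONDITION & SPEC =====
-- Pre_ restricts start to a genuine index (0 ≤ start), the function's natural domain;
-- for negative start Python's clamped find-offset and wrapped slice bound give
-- accidental values that neither caller nor B would specify.
def Pre_find_directive_end (content : String) (start : Int) : Prop := 0 ≤ start
instance (content : String) (start : Int) : Decidable (Pre_find_directive_end content start) := by unfold Pre_find_directive_end; infer_instance

def pvWitness_find_directive_end : String × Int := ("a \\\nb\n", 0)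

def Spec_find_directive_end (content : String) (start : Int) (out : Int) : Prop := out = find_directive_end_alt content start
instance (content : String) (start : Int) (out : Int) : Decidable (Spec_find_directive_end content start out) := by unfold Spec_find_directive_end; infer_instance

-- ===== CLAIM (what is proved, stated in full; the proofs are below) =====
def Claim_equal_find_directive_end : Prop := ∀ (content : String) (start : Int), Dom_find_directive_end content start → Pre_find_directive_end content start → Spec_find_directive_end content start (find_directive_end content start)

-- ===== LEMMAS AND PROOFS =====

-- B's accumulator step over one segment character.
def pvStep (a : Option Char) (c : Char) : Option Char :=
  if PySem.Chars.isspace c then a else some c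

-- [c] prefix of l ↔ head
theorem pv_singleton_prefix (a : Char) (l : List Char) : [a] <+: l ↔ l.head? = some a := by
  cases l with
  | nil => simp
  | cons x xs => simp [List.cons_prefix_iff]

-- the fold over a chunk computes the last non-whitespace char (none if all whitespace)
theorem pv_fold_eq_find_rev (l : List Char) (init : Option Char) :
    l.foldl pvStep init =
      match l.reverse.find? (fun c => ! PySem.Chars.isspace c) with
      | some c => some c
      | none => init := by
  induction l using List.reverseRecOn generalizing init with
  | nil => simp
  | append_singleton xs x ih =>
    simp only [List.foldl_append, List.foldl_cons, List.foldl_nil, List.reverse_append,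
      List.reverse_cons, List.reverse_nil, List.nil_append, List.cons_append, List.find?]
    by_cases hx : PySem.Chars.isspace x
    · simp [pvStep, hx, ih]
    · simp [pvStep, hx]

-- A's rstrip-based test agrees with the fold
theorem pv_rstrip_getLast (l : List Char) :
    (PySem.Chars.rstrip l).getLast? = l.foldl pvStep none := by
  rw [pv_fold_eq_find_rev]
  simp only [PySem.Chars.rstrip, List.getLast?_reverse,
    ← List.find?_not_eq_head?_dropWhile PySem.Chars.isspace l.reverse]
  cases l.reverse.find? (fun c => ! PySem.Chars.isspace c) <;> simp

-- one unfolding step of pvBLoop at a valid Nat index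
theorem pv_bloop_step (cs : List Char) (seg : Int) (last : Option Char) (j : Nat)
    (h : j < cs.length) :
    pvBLoop cs seg last (j : Int) =
      (if cs[j] = '\n' ∧ seg < (j : Int) then
        if last ≠ some '\\' then (j : Int)
        else pvBLoop cs ((j : Int) + 1) none ((j : Int) + 1)
      else if ¬ PySem.Chars.isspace cs[j] then pvBLoop cs seg (some cs[j]) ((j : Int) + 1)
      else pvBLoop cs seg last ((j : Int) + 1)) := by
  rw [pvBLoop, if_pos (by exact_mod_cast h)]
  have hcj : PySem.List.pyGet? cs (j : Int) = some cs[j] := by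
    rw [PySem.List.pyGet?_natCast, List.getElem?_eq_getElem h]
  rw [hcj]

-- pvBLoop past the end returns -1
theorem pv_bloop_end (cs : List Char) (seg : Int) (last : Option Char) (j : Int)
    (h : ¬ j < (cs.length : Int)) : pvBLoop cs seg last j = -1 := by
  rw [pvBLoop, if_neg h]

-- pvBLoop never finds a terminating newline: returns -1
theorem pv_bloop_none (cs : List Char) (seg : Nat) (last : Option Char) (j : Nat)
    (hseg : seg ≤ j)
    (hno : ∀ i, j ≤ i → (h : i < cs.length) → seg < i → cs[i] ≠ '\n') :
    pvBLoop cs (seg : Int) last (j : Int) = -1 := by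
  by_cases h : j < cs.length
  · rw [pv_bloop_step cs (seg : Int) last j h]
    have hj : ¬ (cs[j] = '\n' ∧ (seg : Int) < (j : Int)) := by
      rintro ⟨hc, hs⟩; exact hno j le_rfl h (by exact_mod_cast hs) hc
    rw [if_neg hj]
    have hc1 : (j : Int) + 1 = ((j + 1 : Nat) : Int) := by push_cast; ring
    by_cases hw : PySem.Chars.isspace cs[j]
    · rw [if_neg (by simp [hw]), hc1]
      exact pv_bloop_none cs seg last (j + 1) (by omega)
        (fun i hi h' hs => hno i (by omega) h' hs)
    · rw [if_pos (by simp [hw]), hc1]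
      exact pv_bloop_none cs seg (some cs[j]) (j + 1) (by omega)
        (fun i hi h' hs => hno i (by omega) h' hs)
  · exact pv_bloop_end cs _ last _ (by exact_mod_cast h)
termination_by cs.length - j

-- pvBLoop scans the current segment up to the first terminating newline f
theorem pv_bloop_seg (cs : List Char) (seg : Nat) (f : Nat) (hf : f < cs.length)
    (hnl : cs[f] = '\n') (hsf : seg < f) (j : Nat) (last : Option Char)
    (hsegj : seg ≤ j) (hjf : j ≤ f)
    (hmin : ∀ i, j ≤ i → i < f → seg < i → (h : i < cs.length) → cs[i] ≠ '\n') :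
    pvBLoop cs (seg : Int) last (j : Int) =
      (if ((cs.drop j).take (f - j)).foldl pvStep last ≠ some '\\' then (f : Int)
       else pvBLoop cs ((f + 1 : Nat) : Int) none ((f + 1 : Nat) : Int)) := by
  have hjlt : j < cs.length := lt_of_le_of_lt hjf hf
  rw [pv_bloop_step cs (seg : Int) last j hjlt]
  have hc1 : (j : Int) + 1 = ((j + 1 : Nat) : Int) := by push_cast; ring
  by_cases hjeqf : j = f
  · subst hjeqf
    rw [if_pos ⟨hnl, by exact_mod_cast hsf⟩]
    have h0 : ((cs.drop j).take (j - j)) = [] := by simp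
    rw [h0]
    simp only [List.foldl_nil]
    by_cases hl : last ≠ some '\\'
    · rw [if_pos hl, if_pos hl]
    · rw [if_neg hl, if_neg hl, hc1]
  · have hjltf : j < f := lt_of_le_of_ne hjf hjeqf
    have hchunk : (cs.drop j).take (f - j) = cs[j] :: ((cs.drop (j + 1)).take (f - (j + 1))) := by
      rw [List.drop_eq_getElem_cons hjlt]
      have h1 : f - j = (f - (j + 1)) + 1 := by omega
      rw [h1, List.take_succ_cons]
    have hcond : ¬ (cs[j] = '\n' ∧ (seg : Int) < (j : Int)) := by
      rintro ⟨hc, hs⟩; exact hmin j le_rfl hjltf (by exact_mod_cast hs) hjlt hc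
    rw [if_neg hcond]
    by_cases hw : PySem.Chars.isspace cs[j]
    · rw [if_neg (by simp [hw]), hc1]
      rw [pv_bloop_seg cs seg f hf hnl hsf (j + 1) last (by omega) (by omega)
        (fun i hi h1 h2 h3 => hmin i (by omega) h1 h2 h3)]
      rw [hchunk]
      simp [pvStep, hw]
    · rw [if_pos (by simp [hw]), hc1]
      rw [pv_bloop_seg cs seg f hf hnl hsf (j + 1) (some cs[j]) (by omega) (by omega)
        (fun i hi h1 h2 h3 => hmin i (by omega) h1 h2 h3)]
      rw [hchunk]
      simp [pvStep, hw]
termination_by f - j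

-- findFrom with a start index beyond the string returns -1
theorem pv_findFrom_past (cs sub : List Char) (k : Int) (h0 : 0 ≤ k)
    (h : (cs.length : Int) < k) : PySem.Chars.findFrom cs sub k none = -1 := by
  simp only [PySem.Chars.findFrom]
  split_ifs <;> omega

-- characterization of A's fin: either no newline at index ≥ k, or the first one
theorem pv_findFrom_newline (cs : List Char) (k : Nat) (hk : k ≤ cs.length) :
    (PySem.Chars.findFrom cs ['\n'] (k : Int) none = -1 ∧
      ∀ i, k ≤ i → (h : i < cs.length) → cs[i] ≠ '\n') ∨
    (∃ f : Nat, PySem.Chars.findFrom cs ['\n'] (k : Int) none = (f : Int) ∧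
      k ≤ f ∧ ∃ (hflt : f < cs.length), cs[f] = '\n' ∧
      ∀ i, k ≤ i → i < f → (h : i < cs.length) → cs[i] ≠ '\n') := by
  by_cases hneg : PySem.Chars.findFrom cs ['\n'] (k : Int) none = -1
  · left
    refine ⟨hneg, ?_⟩
    rw [PySem.Chars.findFrom_natCast_eq_neg_one_iff cs ['\n'] k hk] at hneg
    intro i hi h hc
    apply hneg
    rw [List.singleton_infix_iff]
    rw [← hc, List.mem_iff_getElem]
    refine ⟨i - k, ?_, ?_⟩
    · rw [List.length_drop]; omega
    · rw [List.getElem_drop]; congr 1; omega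
  · right
    obtain ⟨hle, hpre, hmin⟩ := PySem.Chars.findFrom_natCast_spec cs ['\n'] k hk hneg
    set r := PySem.Chars.findFrom cs ['\n'] (k : Int) none with hr
    have hr0 : 0 ≤ r := le_trans (by exact_mod_cast Nat.zero_le k) hle
    have hpre' := hpre
    rw [pv_singleton_prefix, List.head?_drop] at hpre'
    have hlt : r.toNat < cs.length := by
      by_contra hge
      rw [List.getElem?_eq_none (le_of_not_gt (fun hx => hge hx))] at hpre'
      simp at hpre'
    refine ⟨r.toNat, by omega, by omega, hlt, ?_, ?_⟩
    · rw [List.getElem?_eq_getElem hlt] at hpre'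
      exact Option.some_injective _ hpre'
    · intro i hi hif h hc
      exact hmin i hi hif (by
        rw [pv_singleton_prefix, List.head?_drop, List.getElem?_eq_getElem h, hc])

-- main loop equivalence, by induction on the fuel
theorem pv_main (cs : List Char) : ∀ fuel seg : Nat, cs.length - seg < fuel →
    pvALoop cs (seg : Int) fuel = pvBLoop cs seg none seg := by
  intro fuel
  induction fuel with
  | zero => intro seg h; omega
  | succ fuel ih =>
    intro seg hfuel
    by_cases hseg : seg < cs.length
    · have hk : seg + 1 ≤ cs.length := by omega
      have hcast : (seg : Int) + 1 = ((seg + 1 : Nat) : Int) := by push_cast; ring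
      rcases pv_findFrom_newline cs (seg + 1) hk with ⟨hneg, hno⟩ | ⟨f, hfin, hge, hflt, hnl, hmin⟩
      · rw [pvALoop]
        simp only [hcast, hneg]
        exact (pv_bloop_none cs seg none seg le_rfl
          (fun i hi h hs => hno i (by omega) h)).symm
      · rw [pvALoop]
        simp only [hcast, hfin]
        have hne : ¬ ((f : Int) = -1 ∨ (f : Int) = (seg : Int)) := by
          rintro (h | h) <;> omega
        rw [if_neg hne]
        have hslice : PySem.List.slice cs (some (seg : Int)) (some (f : Int)) =
            (cs.drop seg).take (f - seg) := PySem.List.slice_natCast cs seg f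
        have hchunkcond : (PySem.Chars.rstrip ((cs.drop seg).take (f - seg))).getLast? =
            ((cs.drop seg).take (f - seg)).foldl pvStep none := pv_rstrip_getLast _
        have hbs := pv_bloop_seg cs seg f hflt hnl (by omega) seg none le_rfl (by omega)
          (fun i hi h1 h2 h3 => hmin i (by omega) (by omega) h3)
        set aux := PySem.Chars.rstrip ((cs.drop seg).take (f - seg)) with haux
        have hget : PySem.List.pyGet? aux (-1) = aux.getLast? := PySem.List.pyGet?_neg_one aux
        by_cases hcond : ((cs.drop seg).take (f - seg)).foldl pvStep none ≠ some '\\'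
        · rw [hslice, if_pos (Or.inr (by rw [hget, hchunkcond]; exact hcond)), hbs,
            if_pos hcond]
        · rw [not_not] at hcond
          rw [hslice, if_neg ?_, hbs, if_neg (by simp [hcond])]
          · have : (f : Int) + 1 = ((f + 1 : Nat) : Int) := by push_cast; ring
            rw [this]
            exact ih (f + 1) (by omega)
          · rintro (hlen | hlast)
            · have hgl : aux.getLast? = some '\\' := by rw [hchunkcond]; exact hcond
              have h0 : aux = [] := List.eq_nil_of_length_eq_zero hlen
              simp [h0] at hgl
            · exact hlast (by rw [hget, hchunkcond]; exact hcond)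
    · rw [pvALoop, pvBLoop]
      have hpast : PySem.Chars.findFrom cs ['\n'] ((seg : Int) + 1) none = -1 :=
        pv_findFrom_past cs ['\n'] ((seg : Int) + 1) (by omega) (by omega)
      simp [hpast, hseg]

-- ===== VERDICT (by name: the statement is the Claim_ definition above) =====
theorem find_directive_end_spec : Claim_equal_find_directive_end := by
  intro content start _ hpre
  unfold Spec_find_directive_end find_directive_end find_directive_end_alt
  have h : start = ((start.toNat : Nat) : Int) := (Int.toNat_of_nonneg hpre).symm
  rw [h]
  exact pv_main content.toList (content.toList.length + 1) start.toNat (by omega)
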